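-- pv_equiv track=rewrite | github.com/egolus/aoc_2023 | solve23.py | takePath
-- ===== SOURCE A (Python) =====
-- slopes = {
--     "^": (-1, 0),
--     "<": (0, -1),
--     ">": (0, 1),
--     "v": (1, 0)
-- }
--
-- def takePath(grid, pos, target, path, longest):
--     finished = True
--     for n in ((-1, 0), (0, -1), (0, 1), (1, 0)):
--         npos = pos[0] + n[0], pos[1] + n[1]
--         if npos in grid and npos not in path:
--             if grid[npos] != "." and slopes[grid[npos]] != n:
--                 continue
--             finished = False
--             longest = takePath(grid, npos, target, path+[pos], longest)
--         if finished:
--             if pos == target: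
--                 longest = sorted((longest, path), key=lambda x: len(x))[-1]
--     return longest
-- ===== SOURCE B (Python) =====
-- # Iterative DFS over an explicit stack of (position, path) frames; records the longest
-- # path seen at a dead-end on the target, later discoveries winning ties.
-- slopes = {
--     "^": (-1, 0),
--     "<": (0, -1),
--     ">": (0, 1),
--     "v": (1, 0)
-- }
--
--
-- def takePath(grid, pos, target, path, longest):
--     best = longest
--     stack = [(pos, path)]
--     while stack:
--         p, pa = stack.pop()
--         kids = []
--         for dr, dc in ((-1, 0), (0, -1), (0, 1), (1, 0)):
--             np = (p[0] + dr, p[1] + dc)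
--             if np in grid and np not in pa and (grid[np] == "." or slopes[grid[np]] == (dr, dc)):
--                 kids.append(np)
--         if not kids:
--             if p == target and len(pa) >= len(best):
--                 best = pa
--         else:
--             stack.extend((c, pa + [p]) for c in reversed(kids))
--     return best
-- ===== Notes on version B (the rewrite author's own statement) =====
-- stated objective: alternative
-- what changed: A's recursive DFS (threading `longest` through recursive calls with a mid-loop `finished` check) is replaced by an iterative DFS over an explicit stack of (pos, path) frames that collects each node's valid onward neighbours in one scan, treats a node with no onward neighbour as a dead end (recording it when it is the target and at least as long as the running best), and pushes children in reverse so discovery order and tie-breaking match; …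
-- outside the precondition, e.g. on takePath({(0, 0): '.', (5, 5): '#'}, (0, 0), (0, 0), [], []): A returns [], B returns []
import Mathlib
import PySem

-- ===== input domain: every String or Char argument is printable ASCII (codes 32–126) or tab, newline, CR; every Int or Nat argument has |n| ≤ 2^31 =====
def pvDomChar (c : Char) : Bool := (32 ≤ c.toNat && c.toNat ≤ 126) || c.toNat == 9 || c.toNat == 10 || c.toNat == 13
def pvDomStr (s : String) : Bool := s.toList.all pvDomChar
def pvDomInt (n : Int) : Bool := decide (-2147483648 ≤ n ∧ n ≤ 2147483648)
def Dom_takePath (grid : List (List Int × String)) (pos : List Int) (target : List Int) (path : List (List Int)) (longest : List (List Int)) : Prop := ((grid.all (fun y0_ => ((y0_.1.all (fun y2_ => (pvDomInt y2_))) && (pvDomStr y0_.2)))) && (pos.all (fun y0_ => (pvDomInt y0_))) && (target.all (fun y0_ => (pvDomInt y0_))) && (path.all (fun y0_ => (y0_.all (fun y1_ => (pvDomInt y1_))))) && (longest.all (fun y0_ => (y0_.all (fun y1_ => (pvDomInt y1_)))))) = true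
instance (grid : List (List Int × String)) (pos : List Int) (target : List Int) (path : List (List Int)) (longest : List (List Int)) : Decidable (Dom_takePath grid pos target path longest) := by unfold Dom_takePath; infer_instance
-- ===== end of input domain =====

-- B replaces A's recursive DFS by an iterative DFS over an explicit stack of (pos, path)
-- frames; equal return value on Pre_ (no argument is mutated by either version).

-- helpers shared by the two ports (the module constant `slopes` and the direction tuple)
def pvSlope (s : String) : Option (Int × Int) :=
  if s = "^" then some (-1, 0)
  else if s = "<" then some (0, -1)
  else if s = ">" then some (0, 1)
  else if s = "v" then some (1, 0)
  else none

def pvDirs : List (Int × Int) := [(-1, 0), (0, -1), (0, 1), (1, 0)]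

-- `npos in grid` / `grid[npos]` : first-match lookup in the association list (Python dict)
def pvLook (grid : List (List Int × String)) (k : List Int) : Option String :=
  (PySem.Dict.mk grid).get? k

-- termination measure (proof machinery only, not part of either algorithm)
def pvM (grid : List (List Int × String)) (path : List (List Int)) : Nat :=
  (grid.filter (fun kv => kv.1 ∉ path)).length

def pvPhi (grid : List (List Int × String)) (pos : List Int) (path : List (List Int)) : Nat :=
  2 * pvM grid path + (if (pvLook grid pos).isSome ∧ pos ∉ path then 0 else 1)

theorem pvM_append_le (grid : List (List Int × String)) (pa : List (List Int)) (x : List Int) :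
    pvM grid (pa ++ [x]) ≤ pvM grid pa := by
  unfold pvM
  induction grid with
  | nil => simp
  | cons kv g ih =>
    by_cases h : kv.1 ∈ pa ++ [x] <;> by_cases h2 : kv.1 ∈ pa <;>
      simp_all [List.filter_cons] <;> omega

theorem pvM_append_lt (grid : List (List Int × String)) (pa : List (List Int)) (x : List Int)
    (h : (pvLook grid x).isSome) (hx : x ∉ pa) :
    pvM grid (pa ++ [x]) < pvM grid pa := by
  induction grid with
  | nil => simp [pvLook, PySem.Dict.get?] at h
  | cons kv g ih =>
    obtain ⟨k0, v0⟩ := kv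
    by_cases he : k0 = x
    · have h1 : k0 ∉ pa := he ▸ hx
      have h2 : k0 ∈ pa ++ [x] := by simp [he]
      have := pvM_append_le g pa x
      simp only [pvM, List.filter_cons] at *
      simp [h1, h2] at *
      omega
    · have hh : (pvLook g x).isSome := by
        rw [pvLook, PySem.Dict.get?_mk_cons] at h
        simpa [show (k0 == x) = false by simpa using he] using h
      have := ih hh
      simp only [pvM, List.filter_cons] at *
      by_cases h1 : k0 ∈ pa <;> by_cases h2 : k0 ∈ pa ++ [x] <;> simp_all <;> omega

theorem pvPhi_child_lt (grid : List (List Int × String)) (pos npos : List Int)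
    (path : List (List Int)) (h1 : (pvLook grid npos).isSome) (h2 : npos ∉ path) :
    pvPhi grid npos (path ++ [pos]) < pvPhi grid pos path := by
  by_cases he : npos = pos
  · subst he
    have hlt := pvM_append_lt grid path npos h1 h2
    have hc : ¬ ((pvLook grid npos).isSome ∧ npos ∉ path ++ [npos]) := by simp
    unfold pvPhi
    rw [if_neg hc, if_pos ⟨h1, h2⟩]
    omega
  · have hflag : npos ∉ path ++ [pos] := by simp [h2, he]
    unfold pvPhi
    rw [if_pos ⟨h1, hflag⟩]
    by_cases hp : (pvLook grid pos).isSome ∧ pos ∉ path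
    · rw [if_pos hp]
      have := pvM_append_lt grid path pos hp.1 hp.2
      omega
    · rw [if_neg hp]
      have := pvM_append_le grid path pos
      omega

-- ===== PORT A =====
-- `longest = sorted((longest, path), key=lambda x: len(x))[-1]`
def pvUpd (longest path : List (List Int)) : List (List Int) :=
  (PySem.List.sorted [longest, path] (fun x => (x.length : Int))).getLastD []

mutual
def takePath (grid : List (List Int × String)) (pos : List Int) (target : List Int) (path : List (List Int)) (longest : List (List Int)) : List (List Int) :=
  -- finished = True; for n in dirs: …; return longest
  (takeLoop grid pos target path pvDirs true longest).2
termination_by (pvPhi grid pos path, 5)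
decreasing_by exact Prod.Lex.right _ (by decide)

def takeLoop (grid : List (List Int × String)) (pos : List Int) (target : List Int) (path : List (List Int)) (dirs : List (Int × Int)) (finished : Bool) (longest : List (List Int)) : Bool × List (List Int) :=
  match dirs with
  | [] => (finished, longest)
  | n :: rest =>
    -- npos = pos[0] + n[0], pos[1] + n[1]  (Python raises IndexError if len(pos) < 2; Pre_ excludes)
    match PySem.List.pyGet? pos 0, PySem.List.pyGet? pos 1 with
    | some p0, some p1 =>
      match hc : pvLook grid [p0 + n.1, p1 + n.2] with
      | some cell =>          -- npos in grid
        if hmem : [p0 + n.1, p1 + n.2] ∈ path then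
          -- `npos in path`: body skipped, falls through to the `if finished` check
          takeLoop grid pos target path rest finished
            (if finished = true ∧ pos = target then pvUpd longest path else longest)
        else if cell ≠ "." ∧ pvSlope cell ≠ some n then
          -- `continue` (skips the `if finished` check; pvSlope _ = none is Python's KeyError, Pre_ excludes)
          takeLoop grid pos target path rest finished longest
        else
          takeLoop grid pos target path rest false
            (takePath grid [p0 + n.1, p1 + n.2] target (path ++ [pos]) longest)
      | none =>
        -- npos not in grid: falls through to the `if finished` check
        takeLoop grid pos target path rest finished
          (if finished = true ∧ pos = target then pvUpd longest path else longest)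
    | _, _ => (finished, longest)   -- unreachable under Pre_ (IndexError)
termination_by (pvPhi grid pos path, dirs.length)
decreasing_by
  · exact Prod.Lex.right _ (by simp only [List.length_cons]; omega)
  · exact Prod.Lex.right _ (by simp only [List.length_cons]; omega)
  · exact Prod.Lex.left _ _ (pvPhi_child_lt grid pos _ path (by simp [hc]) hmem)
  · exact Prod.Lex.right _ (by simp only [List.length_cons]; omega)
  · exact Prod.Lex.right _ (by simp only [List.length_cons]; omega)
end

-- ===== PORT B =====
-- the for-loop of Source B collecting the valid onward neighbours of p into `kids`
def pvScanB (grid : List (List Int × String)) (pa : List (List Int)) (p0 p1 : Int)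
    (dirs : List (Int × Int)) (kids : List (List Int)) : List (List Int) :=
  match dirs with
  | [] => kids
  | n :: rest =>
    match pvLook grid [p0 + n.1, p1 + n.2] with
    | some cell =>
      if [p0 + n.1, p1 + n.2] ∉ pa ∧ (cell = "." ∨ pvSlope cell = some n) then
        pvScanB grid pa p0 p1 rest (kids ++ [[p0 + n.1, p1 + n.2]])
      else pvScanB grid pa p0 p1 rest kids
    | none => pvScanB grid pa p0 p1 rest kids

-- the valid onward neighbours in direction order (characterisation used by the proofs
-- and by pvRun's termination argument)
def pvKids (grid : List (List Int × String)) (pa : List (List Int)) (p0 p1 : Int)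
    (dirs : List (Int × Int)) : List (List Int) :=
  dirs.filterMap (fun n =>
    match pvLook grid [p0 + n.1, p1 + n.2] with
    | some cell =>
      if [p0 + n.1, p1 + n.2] ∈ pa then none
      else if cell = "." ∨ pvSlope cell = some n then some [p0 + n.1, p1 + n.2]
      else none
    | none => none)

theorem pvScanB_eq (grid : List (List Int × String)) (pa : List (List Int)) (p0 p1 : Int) :
    ∀ (dirs : List (Int × Int)) (kids : List (List Int)),
      pvScanB grid pa p0 p1 dirs kids = kids ++ pvKids grid pa p0 p1 dirs := by
  intro dirs
  induction dirs with
  | nil => intro kids; simp [pvScanB, pvKids]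
  | cons n rest ih =>
    intro kids
    simp only [pvScanB]
    split
    next cell hc =>
      by_cases hmem : [p0 + n.1, p1 + n.2] ∈ pa
      · rw [if_neg (by simp [hmem]), ih]
        simp [pvKids, hc, hmem]
      · by_cases hv : cell = "." ∨ pvSlope cell = some n
        · rw [if_pos ⟨hmem, hv⟩, ih]
          simp [pvKids, hc, hmem, hv]
        · rw [if_neg (by tauto), ih]
          simp [pvKids, hc, hmem, hv]
    next hc =>
      rw [ih]
      simp [pvKids, hc]

theorem pvKids_mem (grid : List (List Int × String)) (pa : List (List Int)) (p0 p1 : Int)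
    (dirs : List (Int × Int)) :
    ∀ k ∈ pvKids grid pa p0 p1 dirs, (pvLook grid k).isSome ∧ k ∉ pa := by
  intro k hk
  simp only [pvKids, List.mem_filterMap] at hk
  obtain ⟨n, -, hf⟩ := hk
  split at hf
  next cell hc =>
    by_cases hmem : [p0 + n.1, p1 + n.2] ∈ pa
    · rw [if_pos hmem] at hf
      exact absurd hf (by simp)
    · rw [if_neg hmem] at hf
      by_cases hv : cell = "." ∨ pvSlope cell = some n
      · rw [if_pos hv] at hf
        obtain rfl : [p0 + n.1, p1 + n.2] = k := Option.some.inj hf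
        exact ⟨by simp [hc], hmem⟩
      · rw [if_neg hv] at hf
        exact absurd hf (by simp)
  next => exact absurd hf (by simp)

-- stack measure: the sum of 5^phi over the frames
def pvW (grid : List (List Int × String)) (stack : List (List Int × List (List Int))) : Nat :=
  (stack.map (fun f => 5 ^ pvPhi grid f.1 f.2)).sum

theorem pvW_step (grid : List (List Int × String)) (p : List Int) (pa : List (List Int))
    (rest : List (List Int × List (List Int))) (kids : List (List Int))
    (hlen : kids.length ≤ 4)
    (hk : ∀ k ∈ kids, pvPhi grid k (pa ++ [p]) < pvPhi grid p pa) :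
    pvW grid (kids.map (fun k => (k, pa ++ [p])) ++ rest) < pvW grid ((p, pa) :: rest) := by
  have hsum : ((kids.map (fun k => (k, pa ++ [p]))).map (fun f => 5 ^ pvPhi grid f.1 f.2)).sum
      < 5 ^ pvPhi grid p pa := by
    cases kids with
    | nil => simpa using pow_pos (show (0:ℕ) < 5 by norm_num) (pvPhi grid p pa)
    | cons k0 ks =>
      have hphi1 : 1 ≤ pvPhi grid p pa := by
        have := hk k0 (by simp)
        omega
      have hbound : ∀ kids' : List (List Int),
          (∀ k ∈ kids', pvPhi grid k (pa ++ [p]) < pvPhi grid p pa) →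
          ((kids'.map (fun k => (k, pa ++ [p]))).map (fun f => 5 ^ pvPhi grid f.1 f.2)).sum
            ≤ kids'.length * 5 ^ (pvPhi grid p pa - 1) := by
        intro kids'
        induction kids' with
        | nil => simp
        | cons a l ihl =>
          intro h
          have ha : 5 ^ pvPhi grid a (pa ++ [p]) ≤ 5 ^ (pvPhi grid p pa - 1) :=
            Nat.pow_le_pow_right (by norm_num) (by have := h a (by simp); omega)
          have hl := ihl (fun k hk' => h k (by simp [hk']))
          simp only [List.map_cons, List.sum_cons, List.length_cons]
          calc 5 ^ pvPhi grid a (pa ++ [p])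
                + ((l.map (fun k => (k, pa ++ [p]))).map (fun f => 5 ^ pvPhi grid f.1 f.2)).sum
              ≤ 5 ^ (pvPhi grid p pa - 1) + l.length * 5 ^ (pvPhi grid p pa - 1) := by omega
            _ = (l.length + 1) * 5 ^ (pvPhi grid p pa - 1) := by ring
      have h1 := hbound (k0 :: ks) hk
      have hp5 : 0 < 5 ^ (pvPhi grid p pa - 1) := pow_pos (by norm_num) _
      have hpe : 5 ^ (pvPhi grid p pa - 1 + 1) = 5 ^ (pvPhi grid p pa - 1) * 5 := pow_succ 5 _
      have hee : pvPhi grid p pa - 1 + 1 = pvPhi grid p pa := by omega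
      rw [hee] at hpe
      have h2 : (k0 :: ks).length * 5 ^ (pvPhi grid p pa - 1) < 5 ^ pvPhi grid p pa := by
        have hl5 : (k0 :: ks).length < 5 := by
          simp only [List.length_cons] at hlen ⊢
          omega
        calc (k0 :: ks).length * 5 ^ (pvPhi grid p pa - 1)
            < 5 * 5 ^ (pvPhi grid p pa - 1) :=
              (Nat.mul_lt_mul_right hp5).mpr hl5
          _ = 5 ^ pvPhi grid p pa := by omega
      omega
  unfold pvW
  simp only [List.map_append, List.sum_append, List.map_cons, List.sum_cons]
  omega

-- the while loop of Source B: pop a frame, scan its neighbours, record or push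
def pvRun (grid : List (List Int × String)) (target : List Int)
    (stack : List (List Int × List (List Int))) (best : List (List Int)) : List (List Int) :=
  match stack with
  | [] => best
  | (p, pa) :: rest =>
    match PySem.List.pyGet? p 0, PySem.List.pyGet? p 1 with
    | some p0, some p1 =>
      match hk : pvScanB grid pa p0 p1 pvDirs [] with
      | [] =>
        pvRun grid target rest
          (if p = target ∧ best.length ≤ pa.length then pa else best)
      | k0 :: ks =>
        pvRun grid target ((k0 :: ks).map (fun k => (k, pa ++ [p])) ++ rest) best
    | _, _ => pvRun grid target rest best   -- unreachable under Pre_ (Python raises IndexError)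
termination_by pvW grid stack
decreasing_by
  · unfold pvW
    simp only [List.map_cons, List.sum_cons]
    have : 0 < 5 ^ pvPhi grid p pa := pow_pos (by norm_num) _
    omega
  · apply pvW_step
    · have h1 := pvScanB_eq grid pa p0 p1 pvDirs []
      rw [hk] at h1
      have h2 : (pvKids grid pa p0 p1 pvDirs).length ≤ pvDirs.length :=
        List.length_filterMap_le _ _
      simp only [List.nil_append] at h1
      rw [← h1] at h2
      simpa [pvDirs] using h2
    · intro k hkk
      have h1 := pvScanB_eq grid pa p0 p1 pvDirs []
      rw [hk] at h1
      simp only [List.nil_append] at h1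
      have := pvKids_mem grid pa p0 p1 pvDirs k (h1 ▸ hkk)
      exact pvPhi_child_lt grid p k pa this.1 this.2
  · unfold pvW
    simp only [List.map_cons, List.sum_cons]
    have : 0 < 5 ^ pvPhi grid p pa := pow_pos (by norm_num) _
    omega

def takePath_alt (grid : List (List Int × String)) (pos : List Int) (target : List Int) (path : List (List Int)) (longest : List (List Int)) : List (List Int) :=
  pvRun grid target [(pos, path)] longest

-- ===== PRECONDITION & SPEC =====
-- the target is exit-shaped: no grid cell to its left, right or below (the AoC day-23
-- exit sits alone on the bottom border, approachable only from above)
def pvExitOk (grid : List (List Int × String)) (target : List Int) : Bool :=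
  match target with
  | t0 :: t1 :: _ =>
    decide ([t0, t1 - 1] ∉ grid.map Prod.fst) &&
    decide ([t0, t1 + 1] ∉ grid.map Prod.fst) &&
    decide ([t0 + 1, t1] ∉ grid.map Prod.fst)
  | _ => true

-- Pre_ restricts to the puzzle's natural domain: every cell one of ". ^ < > v" (a cell
-- outside this set raises KeyError when stepped on, so this also excludes some grids with
-- an unreached bad cell on which A returns — see the cites), pos with at least two
-- coordinates (else IndexError), and an exit-shaped target approachable only from above —
-- on other target shapes, which the puzzle never produces, A's mid-loop `finished` check
-- can record a path at a target visit that still has onward moves, an accident of the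
-- check's placement inside the loop, and A's and B's values there may differ (see the cites).
def Pre_takePath (grid : List (List Int × String)) (pos : List Int) (target : List Int) (path : List (List Int)) (longest : List (List Int)) : Prop :=
  2 ≤ pos.length ∧ (∀ kv ∈ grid, kv.2 = "." ∨ kv.2 = "^" ∨ kv.2 = "<" ∨ kv.2 = ">" ∨ kv.2 = "v") ∧
    pvExitOk grid target = true
instance (grid : List (List Int × String)) (pos : List Int) (target : List Int) (path : List (List Int)) (longest : List (List Int)) : Decidable (Pre_takePath grid pos target path longest) := by unfold Pre_takePath; infer_instance

def pvWitness_takePath : (List (List Int × String)) × List Int × List Int × List (List Int) × List (List Int) :=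
  ([([0, 0], "."), ([0, 1], "."), ([1, 1], "v")], [0, 0], [2, 1], [], [])

def Spec_takePath (grid : List (List Int × String)) (pos : List Int) (target : List Int) (path : List (List Int)) (longest : List (List Int)) (out : List (List Int)) : Prop := out = takePath_alt grid pos target path longest
instance (grid : List (List Int × String)) (pos : List Int) (target : List Int) (path : List (List Int)) (longest : List (List Int)) (out : List (List Int)) : Decidable (Spec_takePath grid pos target path longest out) := by unfold Spec_takePath; infer_instance

-- ===== CLAIM (what is proved, stated in full; the proofs are below) =====
def Claim_equal_takePath : Prop := ∀ (grid : List (List Int × String)) (pos : List Int) (target : List Int) (path : List (List Int)) (longest : List (List Int)), Dom_takePath grid pos target path longest → Pre_takePath grid pos target path longest → Spec_takePath grid pos target path longest (takePath grid pos target path longest)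

-- ===== LEMMAS AND PROOFS =====

-- closed form of A's `sorted((longest, path), key=len)[-1]` (stable sort: ties pick `path`)
theorem pvUpd_eq (l pa : List (List Int)) :
    pvUpd l pa = if l.length ≤ pa.length then pa else l := by
  simp only [pvUpd, PySem.List.sorted, PySem.List.insertBy, List.foldl, decide_eq_true_eq,
    if_false, Bool.false_eq_true]
  split_ifs with h1 h2 h2
  · exfalso; omega
  · simp
  · simp
  · exfalso; omega

theorem pvUpd_idem (l pa : List (List Int)) : pvUpd (pvUpd l pa) pa = pvUpd l pa := by
  simp only [pvUpd_eq]
  split_ifs <;> simp_all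

-- A's recording condition at a node: a dead direction comes before the first valid one
def pvOffB (grid : List (List Int × String)) (pa : List (List Int)) (p0 p1 : Int) :
    List (Int × Int) → Bool
  | [] => false
  | n :: rest =>
    match pvLook grid [p0 + n.1, p1 + n.2] with
    | some cell =>
      if [p0 + n.1, p1 + n.2] ∈ pa then true
      else if cell = "." ∨ pvSlope cell = some n then false
      else pvOffB grid pa p0 p1 rest
    | none => true

theorem takeLoop_false (grid : List (List Int × String)) (pos target : List Int)
    (path : List (List Int)) (p0 p1 : Int)
    (hp0 : PySem.List.pyGet? pos 0 = some p0) (hp1 : PySem.List.pyGet? pos 1 = some p1) :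
    ∀ (dirs : List (Int × Int)) (l : List (List Int)),
      takeLoop grid pos target path dirs false l =
        (false, (pvKids grid path p0 p1 dirs).foldl
          (fun l k => takePath grid k target (path ++ [pos]) l) l) := by
  intro dirs
  induction dirs with
  | nil => intro l; simp [takeLoop, pvKids]
  | cons n rest ih =>
    intro l
    rw [takeLoop, hp0, hp1]
    dsimp only
    split
    next cell hc =>
      by_cases hmem : [p0 + n.1, p1 + n.2] ∈ path
      · rw [dif_pos hmem, ih]
        simp [pvKids, hc, hmem]
      · rw [dif_neg hmem]
        by_cases hv : cell = "." ∨ pvSlope cell = some n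
        · have hnv : ¬ (cell ≠ "." ∧ pvSlope cell ≠ some n) := by tauto
          rw [if_neg hnv, ih]
          simp [pvKids, hc, hmem, hv]
        · have hnv : cell ≠ "." ∧ pvSlope cell ≠ some n := by tauto
          rw [if_pos hnv, ih]
          simp [pvKids, hc, hmem, hv]
    next hc =>
      rw [ih]
      simp [pvKids, hc]

theorem takeLoop_true (grid : List (List Int × String)) (pos target : List Int)
    (path : List (List Int)) (p0 p1 : Int)
    (hp0 : PySem.List.pyGet? pos 0 = some p0) (hp1 : PySem.List.pyGet? pos 1 = some p1) :
    ∀ (dirs : List (Int × Int)) (l : List (List Int)),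
      (takeLoop grid pos target path dirs true l).2 =
        (pvKids grid path p0 p1 dirs).foldl
          (fun l k => takePath grid k target (path ++ [pos]) l)
          (if pvOffB grid path p0 p1 dirs = true ∧ pos = target then pvUpd l path else l) := by
  intro dirs
  induction dirs with
  | nil => intro l; simp [takeLoop, pvKids, pvOffB]
  | cons n rest ih =>
    intro l
    rw [takeLoop, hp0, hp1]
    dsimp only
    split
    next cell hc =>
      by_cases hmem : [p0 + n.1, p1 + n.2] ∈ path
      · rw [dif_pos hmem, ih]
        have hoff : pvOffB grid path p0 p1 (n :: rest) = true := by simp [pvOffB, hc, hmem]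
        have hkid : pvKids grid path p0 p1 (n :: rest) = pvKids grid path p0 p1 rest := by
          simp [pvKids, hc, hmem]
        rw [hoff, hkid]
        by_cases hpt : pos = target
        · by_cases ho : pvOffB grid path p0 p1 rest = true <;>
            simp [hpt, ho, pvUpd_idem]
        · simp [hpt]
      · rw [dif_neg hmem]
        by_cases hv : cell = "." ∨ pvSlope cell = some n
        · have hnv : ¬ (cell ≠ "." ∧ pvSlope cell ≠ some n) := by tauto
          rw [if_neg hnv, takeLoop_false grid pos target path p0 p1 hp0 hp1]
          have hoff : pvOffB grid path p0 p1 (n :: rest) = false := by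
            simp [pvOffB, hc, hmem, hv]
          have hkid : pvKids grid path p0 p1 (n :: rest) =
              [p0 + n.1, p1 + n.2] :: pvKids grid path p0 p1 rest := by
            simp [pvKids, hc, hmem, hv]
          rw [hoff, hkid]
          simp
        · have hnv : cell ≠ "." ∧ pvSlope cell ≠ some n := by tauto
          rw [if_pos hnv, ih]
          have hoff : pvOffB grid path p0 p1 (n :: rest) = pvOffB grid path p0 p1 rest := by
            simp [pvOffB, hc, hmem, hv]
          have hkid : pvKids grid path p0 p1 (n :: rest) = pvKids grid path p0 p1 rest := by
            simp [pvKids, hc, hmem, hv]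
          rw [hoff, hkid]
    next hc =>
      rw [ih]
      have hoff : pvOffB grid path p0 p1 (n :: rest) = true := by simp [pvOffB, hc]
      have hkid : pvKids grid path p0 p1 (n :: rest) = pvKids grid path p0 p1 rest := by
        simp [pvKids, hc]
      rw [hoff, hkid]
      by_cases hpt : pos = target
      · by_cases ho : pvOffB grid path p0 p1 rest = true <;>
          simp [hpt, ho, pvUpd_idem]
      · simp [hpt]

-- A at one node: the recorded-best update, then the fold of the recursion over the valid kids
theorem takePath_node (grid : List (List Int × String)) (pos target : List Int)
    (path l : List (List Int)) (p0 p1 : Int)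
    (hp0 : PySem.List.pyGet? pos 0 = some p0) (hp1 : PySem.List.pyGet? pos 1 = some p1) :
    takePath grid pos target path l =
      (pvKids grid path p0 p1 pvDirs).foldl
        (fun l k => takePath grid k target (path ++ [pos]) l)
        (if pvOffB grid path p0 p1 pvDirs = true ∧ pos = target then pvUpd l path else l) := by
  rw [takePath, takeLoop_true grid pos target path p0 p1 hp0 hp1]

theorem takePath_bad (grid : List (List Int × String)) (pos target : List Int)
    (path l : List (List Int))
    (h : PySem.List.pyGet? pos 0 = none ∨ PySem.List.pyGet? pos 1 = none) :
    takePath grid pos target path l = l := by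
  rw [takePath]
  rw [show pvDirs = ((-1 : Int), (0 : Int)) ::
    [((0 : Int), (-1 : Int)), ((0 : Int), (1 : Int)), ((1 : Int), (0 : Int))] from rfl]
  rw [takeLoop]
  split
  next p0 p1 hp0 hp1 =>
    rcases h with h | h
    · rw [h] at hp0; exact absurd hp0 (by simp)
    · rw [h] at hp1; exact absurd hp1 (by simp)
  next => rfl

-- a node whose first two coordinates are known
theorem pvGets_shape (p : List Int) (p0 p1 : Int)
    (h0 : PySem.List.pyGet? p 0 = some p0) (h1 : PySem.List.pyGet? p 1 = some p1) :
    ∃ r, p = p0 :: p1 :: r := by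
  match p with
  | [] => simp [PySem.List.pyGet?_zero] at h0
  | [a] =>
    have h := PySem.List.pyGet?_cons_succ (x := a) (xs := ([] : List Int)) (n := 0)
    norm_num [PySem.List.pyGet?_zero] at h
    rw [h] at h1
    simp at h1
  | a :: b :: r =>
    rw [PySem.List.pyGet?_zero] at h0
    simp at h0
    have hb : PySem.List.pyGet? (a :: b :: r) 1 = some b := by
      have := PySem.List.pyGet?_cons_succ (x := a) (xs := b :: r) (n := 0)
      simpa using this
    rw [hb] at h1
    exact ⟨r, by simp [h0, Option.some.inj h1]⟩

theorem pvLook_none_of_not_mem (grid : List (List Int × String)) (k : List Int)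
    (h : k ∉ grid.map Prod.fst) : pvLook grid k = none := by
  induction grid with
  | nil => rfl
  | cons kv g ih =>
    simp only [List.map_cons, List.mem_cons] at h
    push_neg at h
    rw [pvLook, PySem.Dict.get?_mk_cons, if_neg (by simpa using (Ne.symm h.1))]
    exact ih h.2

-- under the exit shape, A's recording condition at the target is exactly "no onward kid"
theorem pvOffB_iff_kids_nil (grid : List (List Int × String)) (pa : List (List Int))
    (t0 t1 : Int)
    (h1 : pvLook grid [t0, t1 - 1] = none) (h2 : pvLook grid [t0, t1 + 1] = none)
    (h3 : pvLook grid [t0 + 1, t1] = none) :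
    (pvOffB grid pa t0 t1 pvDirs = true ↔ pvKids grid pa t0 t1 pvDirs = []) := by
  have e0 : [t0 + (-1 : Int), t1 + (0 : Int)] = [t0 - 1, t1] := by simp [sub_eq_add_neg]
  have e1 : [t0 + (0 : Int), t1 + (-1 : Int)] = [t0, t1 - 1] := by simp [sub_eq_add_neg]
  have e2 : [t0 + (0 : Int), t1 + (1 : Int)] = [t0, t1 + 1] := by simp
  have e3 : [t0 + (1 : Int), t1 + (0 : Int)] = [t0 + 1, t1] := by simp
  simp only [pvDirs, pvOffB, pvKids, List.filterMap_cons, e0, e1, e2, e3, h1, h2, h3]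
  cases hc : pvLook grid [t0 - 1, t1] with
  | none => simp [hc]
  | some cell =>
    by_cases hmem : [t0 - 1, t1] ∈ pa
    · simp [hc, hmem]
    · by_cases hv : cell = "." ∨ pvSlope cell = some ((-1 : Int), (0 : Int))
      · simp [hc, hmem, hv]
      · simp [hc, hmem, hv]

-- B's stack run is the fold of A over the frames
theorem pvRun_eq (grid : List (List Int × String)) (target : List Int)
    (hsh : pvExitOk grid target = true) :
    ∀ (stack : List (List Int × List (List Int))) (best : List (List Int)),
      pvRun grid target stack best =
        stack.foldl (fun b f => takePath grid f.1 target f.2 b) best := by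
  intro stack best
  fun_induction pvRun grid target stack best with
  | case1 best => simp
  | case2 best p pa rest p0 p1 hx hy hk ih =>
    have hkids : pvKids grid pa p0 p1 pvDirs = [] := by
      have h1 := pvScanB_eq grid pa p0 p1 pvDirs []
      rw [hk] at h1
      simpa using h1.symm
    simp only [dite_eq_ite] at ih
    rw [ih, List.foldl_cons, takePath_node grid p target pa best p0 p1 hy hx, hkids]
    simp only [List.foldl_nil]
    have hinit : (if p = target ∧ best.length ≤ pa.length then pa else best) =
        (if pvOffB grid pa p0 p1 pvDirs = true ∧ p = target
          then pvUpd best pa else best) := by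
      by_cases hpt : p = target
      · obtain ⟨r, hpr⟩ := pvGets_shape p p0 p1 hy hx
        rw [← hpt, hpr] at hsh
        simp only [pvExitOk, Bool.and_eq_true, decide_eq_true_eq] at hsh
        have hiff := pvOffB_iff_kids_nil grid pa p0 p1
          (pvLook_none_of_not_mem _ _ hsh.1.1) (pvLook_none_of_not_mem _ _ hsh.1.2)
          (pvLook_none_of_not_mem _ _ hsh.2)
        have hoff := hiff.mpr hkids
        rw [pvUpd_eq]
        simp [hpt, hoff]
      · simp [hpt]
    rw [hinit]
  | case3 best p pa rest p0 p1 hx hy k0 ks hk ih =>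
    have h1 := pvScanB_eq grid pa p0 p1 pvDirs []
    rw [hk] at h1
    simp only [List.nil_append] at h1
    rw [ih]
    simp only [List.foldl_append, List.foldl_map, List.foldl_cons]
    rw [takePath_node grid p target pa best p0 p1 hy hx, ← h1]
    have hinit : (if pvOffB grid pa p0 p1 pvDirs = true ∧ p = target
        then pvUpd best pa else best) = best := by
      by_cases hpt : p = target
      · obtain ⟨r, hpr⟩ := pvGets_shape p p0 p1 hy hx
        rw [← hpt, hpr] at hsh
        simp only [pvExitOk, Bool.and_eq_true, decide_eq_true_eq] at hsh
        have hiff := pvOffB_iff_kids_nil grid pa p0 p1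
          (pvLook_none_of_not_mem _ _ hsh.1.1) (pvLook_none_of_not_mem _ _ hsh.1.2)
          (pvLook_none_of_not_mem _ _ hsh.2)
        have hne : pvOffB grid pa p0 p1 pvDirs ≠ true := by
          intro h
          have hx2 := h1.trans (hiff.mp h)
          simp at hx2
        rw [if_neg (by tauto)]
      · rw [if_neg (by tauto)]
    rw [hinit]
    rfl
  | case4 best p pa rest hne ih =>
    rw [ih, List.foldl_cons, takePath_bad]
    cases hA : PySem.List.pyGet? p 0 with
    | none => exact Or.inl rfl
    | some p0 =>
      cases hB : PySem.List.pyGet? p 1 with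
      | none => exact Or.inr rfl
      | some p1 => exact (hne p0 p1 hA hB).elim

-- ===== VERDICT (by name: the statement is the Claim_ definition above) =====
theorem takePath_spec : Claim_equal_takePath := by
  intro grid pos target path longest _ hpre
  unfold Spec_takePath takePath_alt
  rw [pvRun_eq grid target hpre.2.2]
  simp
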